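-- pv_equiv track=rewrite | github.com/batulhs/Library-Book-Allocation-Website | backend/server.py | balanced_allocate
-- ===== SOURCE A (Python) =====
-- def balanced_allocate(demand, capacity):
--     allocation = {}
--     sorted_branches = sorted(capacity.items(), key=lambda x: x[1])
--
--     for book, quantity in demand.items():
--         allocation[book] = {}
--         remaining = quantity
--         i = 0
--
--         while remaining > 0 and i < len(sorted_branches):
--             branch, space = sorted_branches[i]
--             can_take = min(remaining, space)
--             if can_take > 0:
--                 allocation[book][branch] = can_take
--                 sorted_branches[i] = (branch, space - can_take)
--                 remaining -= can_take
--             i += 1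
--     return allocation
-- ===== SOURCE B (Python) =====
-- def balanced_allocate(demand, capacity):
--     books = list(demand.items())
--     branches = sorted(capacity.items(), key=lambda x: x[1])
--     n = len(branches)
--     j = 0  # global cursor into branches; everything before j is spent for good
--     allocation = {}
--     for book, rem in books:
--         entries = {}
--         while rem > 0 and j < n:
--             br, s = branches[j]
--             if s <= 0:
--                 j += 1
--             else:
--                 t = min(rem, s)
--                 entries[br] = t
--                 rem -= t
--                 if rem > 0:
--                     j += 1          # branch exhausted, move past it for good
--                 else:
--                     branches[j] = (br, s - t)  # partially used, keep for next book
--         allocation[book] = entries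
--     return allocation
-- ===== Notes on version B (the rewrite author's own statement) =====
-- stated objective: faster
-- what changed: B runs one global cursor over the sorted branch list shared across all books (each branch is passed at most once in total, with a tail-recursive accumulator state machine in the port) instead of A's rescan of the whole branch list from index 0 for every book.
import Mathlib
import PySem

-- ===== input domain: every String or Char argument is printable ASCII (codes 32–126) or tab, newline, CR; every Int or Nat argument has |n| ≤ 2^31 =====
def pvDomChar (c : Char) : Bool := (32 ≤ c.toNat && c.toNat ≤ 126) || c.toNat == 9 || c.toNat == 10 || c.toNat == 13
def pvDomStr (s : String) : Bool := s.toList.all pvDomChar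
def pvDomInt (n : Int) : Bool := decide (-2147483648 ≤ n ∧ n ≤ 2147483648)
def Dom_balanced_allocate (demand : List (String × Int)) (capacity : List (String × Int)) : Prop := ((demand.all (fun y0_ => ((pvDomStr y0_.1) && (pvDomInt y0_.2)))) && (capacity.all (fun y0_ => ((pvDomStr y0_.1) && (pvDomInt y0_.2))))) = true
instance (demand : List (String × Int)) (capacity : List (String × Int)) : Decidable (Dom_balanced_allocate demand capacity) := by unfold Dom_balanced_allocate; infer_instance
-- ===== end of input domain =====

-- B replaces A's per-book rescan of the mutated branch list from index 0 by a single global cursor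
-- over the sorted branches shared across all books (objective: faster).

-- ===== PORT A =====
-- A's inner while loop (index i over the mutated list sorted_branches), as structural recursion
-- over the same list state: returns (this book's allocation entries, updated branch list).
-- allocation[book][branch] = can_take is an insert of a FRESH key (dict keys are distinct), i.e. an append.
def pvAinner (bs : List (String × Int)) (remaining : Int) : List (String × Int) × List (String × Int) :=
  match bs with
  | [] => ([], [])
  | (branch, space) :: rest =>
    if remaining > 0 then
      let can := min remaining space
      if can > 0 then
        let r := pvAinner rest (remaining - can)
        ((branch, can) :: r.1, (branch, space - can) :: r.2)
      else
        let r := pvAinner rest remaining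
        (r.1, (branch, space) :: r.2)
    else ([], (branch, space) :: rest)

-- A's for loop over demand.items(); allocation[book] = {} then filled: fresh book key, an append.
def pvAloop (items : List (String × Int)) (branches : List (String × Int)) : List (String × List (String × Int)) :=
  match items with
  | [] => []
  | (book, quantity) :: rest =>
    let r := pvAinner branches quantity
    (book, r.1) :: pvAloop rest r.2

def balanced_allocate (demand : List (String × Int)) (capacity : List (String × Int)) : List (String × List (String × Int)) :=
  pvAloop (PySem.Dict.ofList demand).items
    (PySem.List.sorted (PySem.Dict.ofList capacity).items (fun x => x.2) false)

-- ===== PORT B =====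
-- B's nested loop as a tail-recursive state machine over the SHARED branch cursor: pvBgo is the
-- inner while loop for the current book (acc = entries built so far, reversed; bs = branch suffix
-- from the cursor j; a branch the cursor moves past is dropped for good), pvBstart is the for loop
-- picking up the next book. All calls are tail calls, exactly like B's single mutable state.
mutual
def pvBgo (bk : String) (acc : List (String × Int)) (rem : Int) (ks : List (String × Int)) (bs : List (String × Int)) : List (String × List (String × Int)) :=
  match bs with
  | [] => (bk, acc.reverse) :: pvBstart ks []
  | (br, s) :: bs' =>
    if rem > 0 then
      if s ≤ 0 then
        pvBgo bk acc rem ks bs'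
      else
        let t := min rem s
        if rem - t > 0 then
          pvBgo bk ((br, t) :: acc) (rem - t) ks bs'
        else
          (bk, ((br, t) :: acc).reverse) :: pvBstart ks ((br, s - t) :: bs')
    else (bk, acc.reverse) :: pvBstart ks ((br, s) :: bs')
termination_by (ks.length, bs.length, 1)

def pvBstart (ks : List (String × Int)) (bs : List (String × Int)) : List (String × List (String × Int)) :=
  match ks with
  | [] => []
  | (bk, q) :: ks' => pvBgo bk [] q ks' bs
termination_by (ks.length, bs.length, 0)
end

def balanced_allocate_alt (demand : List (String × Int)) (capacity : List (String × Int)) : List (String × List (String × Int)) :=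
  pvBstart (PySem.Dict.ofList demand).items
    (PySem.List.sorted (PySem.Dict.ofList capacity).items (fun x => x.2) false)

-- ===== PRECONDITION & SPEC =====
def Spec_balanced_allocate (demand : List (String × Int)) (capacity : List (String × Int)) (out : List (String × List (String × Int))) : Prop := out = balanced_allocate_alt demand capacity
instance (demand : List (String × Int)) (capacity : List (String × Int)) (out : List (String × List (String × Int))) : Decidable (Spec_balanced_allocate demand capacity out) := by unfold Spec_balanced_allocate; infer_instance

-- ===== CLAIM (what is proved, stated in full; the proofs are below) =====
def Claim_equal_balanced_allocate : Prop := ∀ (demand : List (String × Int)) (capacity : List (String × Int)), Dom_balanced_allocate demand capacity → Spec_balanced_allocate demand capacity (balanced_allocate demand capacity)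

-- ===== LEMMAS AND PROOFS =====

-- "l' is l with some entries of non-positive space deleted": A keeps such entries and skips them on
-- every rescan; B's cursor has moved past them for good.
inductive PVDel : List (String × Int) → List (String × Int) → Prop
  | nil : PVDel [] []
  | cons (p : String × Int) {l l' : List (String × Int)} : PVDel l l' → PVDel (p :: l) (p :: l')
  | drop (p : String × Int) {l l' : List (String × Int)} : p.2 ≤ 0 → PVDel l l' → PVDel (p :: l) l'

theorem PVDel.refl (l : List (String × Int)) : PVDel l l := by
  induction l with
  | nil => exact PVDel.nil
  | cons p t ih => exact PVDel.cons p ih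

theorem pvAinner_nonpos (bs : List (String × Int)) (r : Int) (h : ¬ r > 0) :
    pvAinner bs r = ([], bs) := by
  cases bs with
  | nil => simp [pvAinner]
  | cons p t => obtain ⟨b, s⟩ := p; simp [pvAinner, h]

-- non-positive entries are invisible to A's inner loop, up to keeping them in the list state
theorem pvA_del {l l' : List (String × Int)} (h : PVDel l l') :
    ∀ r : Int, (pvAinner l r).1 = (pvAinner l' r).1 ∧ PVDel (pvAinner l r).2 (pvAinner l' r).2 := by
  induction h with
  | nil => intro r; exact ⟨rfl, PVDel.nil⟩
  | cons p hdel ih =>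
    intro r
    obtain ⟨b, s⟩ := p
    by_cases hr : r > 0
    · by_cases hc : min r s > 0
      · simp only [pvAinner, if_pos hr, if_pos hc]
        exact ⟨by rw [(ih (r - min r s)).1], PVDel.cons (b, s - min r s) (ih (r - min r s)).2⟩
      · simp only [pvAinner, if_pos hr, if_neg hc]
        exact ⟨(ih r).1, PVDel.cons (b, s) (ih r).2⟩
    · rw [pvAinner_nonpos _ r hr, pvAinner_nonpos _ r hr]
      exact ⟨rfl, PVDel.cons (b, s) hdel⟩
  | drop p hp hdel ih =>
    intro r
    obtain ⟨b, s⟩ := p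
    by_cases hr : r > 0
    · have hc : ¬ (min r s > 0) := by have : s ≤ 0 := hp; omega
      simp only [pvAinner, if_pos hr, if_neg hc]
      exact ⟨(ih r).1, PVDel.drop (b, s) hp (ih r).2⟩
    · rw [pvAinner_nonpos _ r hr, pvAinner_nonpos _ r hr]
      exact ⟨rfl, PVDel.drop (b, s) hp hdel⟩

theorem pvAloop_del {l l' : List (String × Int)} (h : PVDel l l') (ks : List (String × Int)) :
    pvAloop ks l = pvAloop ks l' := by
  induction ks generalizing l l' with
  | nil => rfl
  | cons p rest ih =>
    obtain ⟨bk, q⟩ := p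
    simp only [pvAloop]
    exact congrArg₂ (fun a t => (bk, a) :: t) (pvA_del h q).1 (ih (pvA_del h q).2)

-- A's loop ignores a leading non-positive branch entry
theorem pvAloop_drop (ks : List (String × Int)) (br : String) {s : Int} (hs : s ≤ 0)
    (l : List (String × Int)) : pvAloop ks ((br, s) :: l) = pvAloop ks l :=
  pvAloop_del (PVDel.drop (br, s) hs (PVDel.refl l)) ks

-- main simulation: B's state machine against A's per-book recursion, under PVDel on the branch state
theorem pv_main (ks : List (String × Int)) :
    ∀ {bsA bsB : List (String × Int)}, PVDel bsA bsB → pvBstart ks bsB = pvAloop ks bsA := by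
  induction ks with
  | nil => intro bsA bsB _; simp [pvBstart, pvAloop]
  | cons p ks' ih =>
    obtain ⟨bk, q⟩ := p
    intro bsA bsB h
    have hgo : ∀ {bsA bsB : List (String × Int)}, PVDel bsA bsB → ∀ (rem : Int) (acc : List (String × Int)),
        pvBgo bk acc rem ks' bsB
          = (bk, acc.reverse ++ (pvAinner bsA rem).1) :: pvAloop ks' (pvAinner bsA rem).2 := by
      intro bsA bsB h
      induction h with
      | nil =>
        intro rem acc
        simp only [pvBgo, pvAinner, List.append_nil]
        exact congrArg _ (ih PVDel.nil)
      | cons p hdel ihh =>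
        intro rem acc
        obtain ⟨br, s⟩ := p
        by_cases hr : rem > 0
        · by_cases hs : s ≤ 0
          · -- A skips but keeps the entry; B's cursor drops it for good
            have hc : ¬ (min rem s > 0) := by omega
            simp only [pvBgo, pvAinner, if_pos hr, if_pos hs, if_neg hc]
            rw [pvAloop_drop ks' br hs, ihh rem acc]
          · have hc : min rem s > 0 := by omega
            by_cases hrem : rem - min rem s > 0
            · -- branch exhausted: A keeps (br, 0) in its state, B's cursor moves past it
              simp only [pvBgo, pvAinner, if_pos hr, if_neg hs, if_pos hc, if_pos hrem]
              have hms : min rem s = s := by omega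
              rw [pvAloop_drop ks' br (by omega : s - min rem s ≤ 0),
                ihh (rem - min rem s) ((br, min rem s) :: acc)]
              simp [List.reverse_cons, List.append_assoc]
            · -- book satisfied here: the partially used branch is kept on both sides
              simp only [pvBgo, pvAinner, if_pos hr, if_neg hs, if_pos hc, if_neg hrem]
              rw [pvAinner_nonpos _ (rem - min rem s) hrem]
              simp only [List.reverse_cons]
              exact congrArg _ (ih (PVDel.cons (br, s - min rem s) hdel))
        · simp only [pvBgo, if_neg hr]
          rw [pvAinner_nonpos _ rem hr]
          simp only [List.append_nil]
          exact congrArg _ (ih (PVDel.cons (br, s) hdel))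
      | drop p hp hdel ihh =>
        intro rem acc
        obtain ⟨br, s⟩ := p
        by_cases hr : rem > 0
        · have hc : ¬ (min rem s > 0) := by have : s ≤ 0 := hp; omega
          simp only [pvAinner, if_pos hr, if_neg hc]
          rw [pvAloop_drop ks' br hp, ihh rem acc]
        · rw [pvAinner_nonpos _ rem hr]
          simp only [List.append_nil]
          rw [pvAloop_drop ks' br hp, ihh rem acc, pvAinner_nonpos _ rem hr]
          simp
    simp only [pvBstart, pvAloop]
    rw [hgo h q []]
    simp

-- ===== VERDICT (by name: the statement is the Claim_ definition above) =====
theorem balanced_allocate_spec : Claim_equal_balanced_allocate := by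
  intro demand capacity _
  unfold Spec_balanced_allocate balanced_allocate balanced_allocate_alt
  exact (pv_main _ (PVDel.refl _)).symm
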